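-- pv_equiv track=rewrite | github.com/joaofig/quadkey-geofence | quadkeyfill.py | insert_qk
-- ===== SOURCE A (Python) =====
-- def insert_qk(area, qk, level):
--     inflating = True
--
--     while inflating:
--         if level not in area:
--             area[level] = set()
--         z = area[level]
--
--         if ((qk & 3) == 3) and ((qk - 1) in z) and ((qk - 2) in z) and ((qk - 3) in z):
--             z.remove(qk - 1)
--             z.remove(qk - 2)
--             z.remove(qk - 3)
--
--             qk = qk >> 2
--             level -= 1
--             # area = insert_qk(area, qk >> 2, level - 1)
--         else:
--             z.add(qk)
--             inflating = False
--
--     return area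
-- ===== SOURCE B (Python) =====
-- def insert_qk(area, qk, level):
--     # phase 1: count how many full sibling groups merge upward (no mutation)
--     k = 0
--     q, l = qk, level
--     while (q & 3) == 3 and all((q - i) in area.get(l, ()) for i in (1, 2, 3)):
--         q >>= 2
--         l -= 1
--         k += 1
--     # phase 2: drop the k merged sibling triples
--     q, l = qk, level
--     for _ in range(k):
--         z = area[l]
--         z.discard(q - 1)
--         z.discard(q - 2)
--         z.discard(q - 3)
--         q >>= 2
--         l -= 1
--     # final insert at the surviving top level
--     if l not in area:
--         area[l] = set()
--     area[l].add(q)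
--     return area
-- ===== Notes on version B (the rewrite author's own statement) =====
-- stated objective: alternative
-- what changed: Replaced A's single destructive while-loop (create-if-missing, test, remove three siblings, continue) by a staged two-phase algorithm: a read-only upward scan that first computes the merge depth k, then a bounded pass that applies the k sibling-triple removals, then one final insertion at the surviving level.
import Mathlib
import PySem

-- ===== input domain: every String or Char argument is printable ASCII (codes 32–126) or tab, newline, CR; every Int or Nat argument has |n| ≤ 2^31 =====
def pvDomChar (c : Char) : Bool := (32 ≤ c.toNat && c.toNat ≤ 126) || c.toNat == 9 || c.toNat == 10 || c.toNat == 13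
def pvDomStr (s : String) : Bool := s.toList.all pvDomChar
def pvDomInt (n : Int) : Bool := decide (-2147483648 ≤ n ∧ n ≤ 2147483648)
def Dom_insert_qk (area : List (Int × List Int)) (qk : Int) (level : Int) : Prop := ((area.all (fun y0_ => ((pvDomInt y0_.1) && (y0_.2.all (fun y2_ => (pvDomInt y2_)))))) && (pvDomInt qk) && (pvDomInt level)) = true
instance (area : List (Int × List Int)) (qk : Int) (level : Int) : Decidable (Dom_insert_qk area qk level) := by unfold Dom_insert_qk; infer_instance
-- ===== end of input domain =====

-- B replaces A's single destructive while-loop by a staged two-phase algorithm: a read-only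
-- upward scan computing the merge depth k, then k sibling-triple removals, then one final add
-- (objective: alternative). Both Pythons mutate `area` in place identically; the equivalence
-- proved is about the returned value. The fuel `area.length + 2` in both ports is a totality
-- guard only: each merging step consumes a distinct existing level key, so it is never exhausted.

-- ===== PORT A =====
def insert_qk_go (fuel : Nat) (area : PySem.Dict Int (PySem.Set Int)) (qk : Int) (level : Int) : PySem.Dict Int (PySem.Set Int) :=
  match fuel with
  | 0 => area
  | fuel + 1 =>
    -- if level not in area: area[level] = set()
    let area1 := if area.contains level then area else area.insert level PySem.Set.empty
    let z := area1.getD level PySem.Set.empty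
    if (((PySem.Int.band qk 3 == 3) && PySem.Set.contains z (qk - 1))
          && PySem.Set.contains z (qk - 2)) && PySem.Set.contains z (qk - 3) then
      -- z.remove(...) cannot raise KeyError here: membership is guarded above
      let z1 := (PySem.Set.remove? z (qk - 1)).getD z
      let z2 := (PySem.Set.remove? z1 (qk - 2)).getD z1
      let z3 := (PySem.Set.remove? z2 (qk - 3)).getD z2
      insert_qk_go fuel (area1.insert level z3) (qk >>> (2 : Nat)) (level - 1)
    else
      area1.insert level (PySem.Set.add z qk)

def insert_qk (area : List (Int × List Int)) (qk : Int) (level : Int) : List (Int × List Int) :=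
  (insert_qk_go (area.length + 2) (PySem.Dict.mk area) qk level).items

-- ===== PORT B =====
-- phase 1: `while (q & 3) == 3 and all((q-i) in area.get(l, ()) ...): q >>= 2; l -= 1; k += 1`
-- (read-only; `area.get(l, ())` membership = getD with the empty set)
def insert_qk_alt_depth (fuel : Nat) (area : PySem.Dict Int (PySem.Set Int)) (q : Int) (l : Int) : Nat :=
  match fuel with
  | 0 => 0
  | fuel + 1 =>
    if PySem.Int.band q 3 == 3
        && ([1, 2, 3] : List Int).all (fun i => PySem.Set.contains (area.getD l PySem.Set.empty) (q - i)) then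
      insert_qk_alt_depth fuel area (q >>> (2 : Nat)) (l - 1) + 1
    else 0

-- phase 2: `for _ in range(k): z = area[l]; z.discard(q-1); z.discard(q-2); z.discard(q-3); ...`
-- (`area[l]` cannot raise: phase 1 only counted levels whose siblings are present)
def insert_qk_alt_apply (k : Nat) (area : PySem.Dict Int (PySem.Set Int)) (q : Int) (l : Int) : (PySem.Dict Int (PySem.Set Int)) × Int × Int :=
  match k with
  | 0 => (area, q, l)
  | k + 1 =>
    let z := area.getD l PySem.Set.empty
    let z3 := PySem.Set.discard (PySem.Set.discard (PySem.Set.discard z (q - 1)) (q - 2)) (q - 3)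
    insert_qk_alt_apply k (area.insert l z3) (q >>> (2 : Nat)) (l - 1)

def insert_qk_alt (area : List (Int × List Int)) (qk : Int) (level : Int) : List (Int × List Int) :=
  let d := PySem.Dict.mk area
  let k := insert_qk_alt_depth (area.length + 2) d qk level
  let r := insert_qk_alt_apply k d qk level
  -- final insert: `if l not in area: area[l] = set()` then `area[l].add(q)`
  let d2 := r.1
  let q := r.2.1
  let l := r.2.2
  let d3 := if d2.contains l then d2 else d2.insert l PySem.Set.empty
  (d3.insert l (PySem.Set.add (d3.getD l PySem.Set.empty) q)).items

-- ===== PRECONDITION & SPEC =====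
def Spec_insert_qk (area : List (Int × List Int)) (qk : Int) (level : Int) (out : List (Int × List Int)) : Prop := out = insert_qk_alt area qk level
instance (area : List (Int × List Int)) (qk : Int) (level : Int) (out : List (Int × List Int)) : Decidable (Spec_insert_qk area qk level out) := by unfold Spec_insert_qk; infer_instance

-- ===== CLAIM (what is proved, stated in full; the proofs are below) =====
def Claim_equal_insert_qk : Prop := ∀ (area : List (Int × List Int)) (qk : Int) (level : Int), Dom_insert_qk area qk level → Spec_insert_qk area qk level (insert_qk area qk level)

-- ===== LEMMAS AND PROOFS =====

-- B's final step, as a function of phase 2's result triple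
def pvFinal (r : (PySem.Dict Int (PySem.Set Int)) × Int × Int) : PySem.Dict Int (PySem.Set Int) :=
  let d3 := if r.1.contains r.2.2 then r.1 else r.1.insert r.2.2 PySem.Set.empty
  d3.insert r.2.2 (PySem.Set.add (d3.getD r.2.2 PySem.Set.empty) r.2.1)

-- the level set A reads (after create-if-missing) is the one B reads directly
lemma zread_eq (area : PySem.Dict Int (PySem.Set Int)) (l : Int) :
    (if area.contains l then area else area.insert l PySem.Set.empty).getD l PySem.Set.empty
      = area.getD l PySem.Set.empty := by
  by_cases h : area.contains l
  · rw [if_pos h]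
  · rw [if_neg h, PySem.Dict.getD_insert_self,
      PySem.Dict.getD_of_not_contains area PySem.Set.empty (by simpa using h)]

-- one step of A's loop, with the guard in B's shape and the removes as discards
lemma go_succ (f : Nat) (area : PySem.Dict Int (PySem.Set Int)) (q l : Int) :
    insert_qk_go (f + 1) area q l =
      (let area1 := if area.contains l then area else area.insert l PySem.Set.empty
       let z := area1.getD l PySem.Set.empty
       if PySem.Int.band q 3 == 3
           && ([1, 2, 3] : List Int).all (fun i => PySem.Set.contains z (q - i)) then
         insert_qk_go f (area1.insert l (PySem.Set.discard (PySem.Set.discard (PySem.Set.discard z (q - 1)) (q - 2)) (q - 3))) (q >>> (2 : Nat)) (l - 1)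
       else area1.insert l (PySem.Set.add z q)) := by
  rw [insert_qk_go]
  dsimp only
  set area1 := if area.contains l then area else area.insert l PySem.Set.empty with harea1
  set z := area1.getD l PySem.Set.empty with hzdef
  have hguard : ((((PySem.Int.band q 3 == 3) && PySem.Set.contains z (q - 1))
        && PySem.Set.contains z (q - 2)) && PySem.Set.contains z (q - 3))
      = (PySem.Int.band q 3 == 3
          && ([1, 2, 3] : List Int).all (fun i => PySem.Set.contains z (q - i))) := by
    simp only [List.all_cons, List.all_nil, Bool.and_true]
    cases PySem.Int.band q 3 == 3 <;> cases PySem.Set.contains z (q - 1) <;>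
      cases PySem.Set.contains z (q - 2) <;> cases PySem.Set.contains z (q - 3) <;> rfl
  rw [hguard]
  by_cases hg : (PySem.Int.band q 3 == 3
      && ([1, 2, 3] : List Int).all (fun i => PySem.Set.contains z (q - i))) = true
  · rw [if_pos hg, if_pos hg]
    simp only [Bool.and_eq_true, List.all_cons, List.all_nil, Bool.and_true] at hg
    obtain ⟨-, h1, h2, h3⟩ := hg
    have m1 : q - 1 ∈ z := by simpa [PySem.Set.contains] using h1
    have m2 : q - 2 ∈ z := by simpa [PySem.Set.contains] using h2
    have m3 : q - 3 ∈ z := by simpa [PySem.Set.contains] using h3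
    rw [PySem.Set.remove?_of_mem m1, Option.getD_some]
    have m2' : q - 2 ∈ PySem.Set.discard z (q - 1) := by
      rw [PySem.Set.mem_discard]; exact ⟨m2, by omega⟩
    rw [PySem.Set.remove?_of_mem m2', Option.getD_some]
    have m3' : q - 3 ∈ PySem.Set.discard (PySem.Set.discard z (q - 1)) (q - 2) := by
      rw [PySem.Set.mem_discard, PySem.Set.mem_discard]; exact ⟨⟨m3, by omega⟩, by omega⟩
    rw [PySem.Set.remove?_of_mem m3', Option.getD_some]
  · rw [if_neg hg, if_neg hg]

-- if the guard passes, the level is already a key of the dict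
lemma contains_of_guard (area : PySem.Dict Int (PySem.Set Int)) (q l : Int)
    (h1 : PySem.Set.contains (area.getD l PySem.Set.empty) (q - 1) = true) :
    area.contains l = true := by
  by_contra hc
  rw [PySem.Dict.getD_of_not_contains area PySem.Set.empty (by simpa using hc)] at h1
  simp [PySem.Set.contains, PySem.Set.empty] at h1

-- phase 1's guard never looks at levels above l: inserting at a higher level is invisible
lemma depth_insert_high (fuel : Nat) : ∀ (area : PySem.Dict Int (PySem.Set Int)) (l' : Int) (z : PySem.Set Int) (q l : Int), l < l' →
    insert_qk_alt_depth fuel (area.insert l' z) q l = insert_qk_alt_depth fuel area q l := by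
  induction fuel with
  | zero => intro _ _ _ _ _ _; rfl
  | succ fuel ih =>
    intro area l' z q l hl
    have hgd : (area.insert l' z).getD l PySem.Set.empty = area.getD l PySem.Set.empty := by
      rw [PySem.Dict.getD_insert]
      exact if_neg (by omega)
    rw [insert_qk_alt_depth, insert_qk_alt_depth, hgd]
    by_cases hg : (PySem.Int.band q 3 == 3
        && ([1, 2, 3] : List Int).all (fun i => PySem.Set.contains (area.getD l PySem.Set.empty) (q - i))) = true
    · rw [if_pos hg, if_pos hg, ih _ _ _ _ _ (by omega)]
    · rw [if_neg hg, if_neg hg]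

-- counting helper for the fuel bound: each merged level is a distinct key ≤ l
lemma countP_le_step (ks : List Int) (l : Int) (h : l ∈ ks) :
    ks.countP (fun k => decide (k ≤ l - 1)) + 1 ≤ ks.countP (fun k => decide (k ≤ l)) := by
  induction ks with
  | nil => cases h
  | cons a ks ih =>
    rw [List.countP_cons, List.countP_cons]
    have hmono : ks.countP (fun k => decide (k ≤ l - 1)) ≤ ks.countP (fun k => decide (k ≤ l)) := by
      apply List.countP_mono_left
      intro x _ hx
      simp only [decide_eq_true_eq] at hx ⊢
      omega
    rcases List.mem_cons.mp h with heq | ha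
    · subst heq
      have h1 : (decide (l ≤ l - 1)) = false := decide_eq_false (by omega)
      have h2 : (decide (l ≤ l)) = true := decide_eq_true (by omega)
      rw [h1, h2]
      simp only [Bool.false_eq_true, if_false, if_true]
      omega
    · have hih := ih ha
      have hcase : (if (decide (a ≤ l - 1)) = true then 1 else 0) ≤ (if (decide (a ≤ l)) = true then 1 else 0) := by
        split_ifs with p1 p2
        · omega
        · simp only [decide_eq_true_eq] at p1 p2
          omega
        · omega
        · omega
      omega

-- phase 1 terminates within the key count: every merging step has its (distinct, decreasing) level in the dict
lemma depth_le_countP (fuel : Nat) : ∀ (area : PySem.Dict Int (PySem.Set Int)) (q l : Int),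
    insert_qk_alt_depth fuel area q l ≤ area.keys.countP (fun k => decide (k ≤ l)) := by
  induction fuel with
  | zero => intro _ _ _; exact Nat.zero_le _
  | succ fuel ih =>
    intro area q l
    rw [insert_qk_alt_depth]
    by_cases hg : (PySem.Int.band q 3 == 3
        && ([1, 2, 3] : List Int).all (fun i => PySem.Set.contains (area.getD l PySem.Set.empty) (q - i))) = true
    · rw [if_pos hg]
      simp only [Bool.and_eq_true, List.all_cons, List.all_nil, Bool.and_true] at hg
      have hm : l ∈ area.keys := (PySem.Dict.contains_iff_mem_keys area l).mp
        (contains_of_guard area q l hg.2.1)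
      have hrec := ih area (q >>> (2 : Nat)) (l - 1)
      have hstep := countP_le_step area.keys l hm
      omega
    · rw [if_neg hg]
      exact Nat.zero_le _

-- A's fused loop = B's staged phases, whenever the fuel strictly dominates the merge depth
lemma go_eq_staged (f : Nat) : ∀ (area : PySem.Dict Int (PySem.Set Int)) (q l : Int),
    insert_qk_alt_depth (f + 1) area q l ≤ f →
    insert_qk_go (f + 1) area q l
      = pvFinal (insert_qk_alt_apply (insert_qk_alt_depth (f + 1) area q l) area q l) := by
  induction f with
  | zero =>
    intro area q l hf
    rw [insert_qk_alt_depth] at hf ⊢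
    rw [go_succ]
    dsimp only
    rw [zread_eq area l]
    by_cases hg : (PySem.Int.band q 3 == 3
        && ([1, 2, 3] : List Int).all (fun i => PySem.Set.contains (area.getD l PySem.Set.empty) (q - i))) = true
    · rw [if_pos hg] at hf
      omega
    · rw [if_neg hg, if_neg hg]
      dsimp only [pvFinal, insert_qk_alt_apply]
      rw [zread_eq area l]
  | succ f ih =>
    intro area q l hf
    rw [insert_qk_alt_depth] at hf ⊢
    rw [go_succ]
    dsimp only
    rw [zread_eq area l]
    by_cases hg : (PySem.Int.band q 3 == 3
        && ([1, 2, 3] : List Int).all (fun i => PySem.Set.contains (area.getD l PySem.Set.empty) (q - i))) = true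
    · -- a merging step
      rw [if_pos hg] at hf
      rw [if_pos hg, if_pos hg]
      have hc : area.contains l = true := by
        simp only [Bool.and_eq_true, List.all_cons, List.all_nil, Bool.and_true] at hg
        exact contains_of_guard area q l hg.2.1
      rw [if_pos hc]
      set z3 := PySem.Set.discard (PySem.Set.discard (PySem.Set.discard (area.getD l PySem.Set.empty) (q - 1)) (q - 2)) (q - 3) with hz3
      have hinv := depth_insert_high (f + 1) area l z3 (q >>> (2 : Nat)) (l - 1) (by omega)
      have hih := ih (area.insert l z3) (q >>> (2 : Nat)) (l - 1) (by rw [hinv]; omega)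
      rw [hih, hinv]
      rfl
    · rw [if_neg hg] at hf
      rw [if_neg hg, if_neg hg]
      dsimp only [pvFinal, insert_qk_alt_apply]
      rw [zread_eq area l]

-- ===== VERDICT (by name: the statement is the Claim_ definition above) =====
theorem insert_qk_spec : Claim_equal_insert_qk := by
  intro area qk level _
  unfold Spec_insert_qk insert_qk insert_qk_alt
  have hbound : insert_qk_alt_depth (area.length + 2) (PySem.Dict.mk area) qk level ≤ area.length + 1 := by
    have h1 := depth_le_countP (area.length + 2) (PySem.Dict.mk area) qk level
    have h2 : (PySem.Dict.mk area).keys.countP (fun k => decide (k ≤ level)) ≤ area.length := by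
      calc (PySem.Dict.mk area).keys.countP (fun k => decide (k ≤ level))
          ≤ (PySem.Dict.mk area).keys.length := List.countP_le_length
        _ = area.length := by rw [PySem.Dict.keys_mk]; simp
    omega
  rw [show area.length + 2 = (area.length + 1) + 1 from rfl,
    go_eq_staged (area.length + 1) (PySem.Dict.mk area) qk level hbound]
  rfl
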